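-- pv_equiv track=rewrite | github.com/gorgeousmwz/Web-Mining | code/web_mining.py | dataStatistics
-- ===== SOURCE A (Python) =====
-- def dataStatistics(data):
--     '''
--     数据统计，统计每个关键词对应的作者和发表年份
--     '''
--     database={}
--     for i in range(len(data)):
--         a=data[i][0].split('; ')[0] # First Author
--         b=data[i][1].split('; ') # Author Keywords
--         c=data[i][2].split('; ') # Keywords Plus
--         d=2025
--         if data[i][3] != '':
--             d=int(data[i][3]) # Publication Year
--         keywords=b+c
--         if keywords !=['']:
--             for keyword in keywords:
--                 if database.get(keyword.lower(),(a,d))[1]>= d: # 如果这个关键词在本篇文章中发表年份更小，则替换作者和年份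
--                     database[keyword.lower()]=(a,d)
--     return database
-- ===== SOURCE B (Python) =====
-- def dataStatistics(data):
--     '''
--     数据统计，统计每个关键词对应的作者和发表年份
--     '''
--     # flatten: one (keyword, (author, year)) candidate per keyword occurrence
--     cands = []
--     for first, kw1, kw2, yr in data:
--         author = first.split('; ')[0]
--         year = 2025 if yr == '' else int(yr)
--         for kw in kw1.split('; ') + kw2.split('; '):
--             cands.append((kw.lower(), (author, year)))
--     # group candidates by keyword (first-occurrence key order)
--     groups = {}
--     for key, av in cands:
--         groups.setdefault(key, []).append(av)
--     # reduce each group: earliest year wins, ties go to the latest candidate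
--     result = {}
--     for key, avs in groups.items():
--         best = avs[0]
--         for av in avs[1:]:
--             if best[1] >= av[1]:
--                 best = av
--         result[key] = best
--     return result
-- ===== Notes on version B (the rewrite author's own statement) =====
-- stated objective: alternative
-- what changed: Replaces A's single pass that conditionally updates a running best-so-far dict with a flatten/group-by-keyword/reduce-each-group pipeline (candidate list, grouping dict of lists, per-group minimum-year reduction).
import Mathlib
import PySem

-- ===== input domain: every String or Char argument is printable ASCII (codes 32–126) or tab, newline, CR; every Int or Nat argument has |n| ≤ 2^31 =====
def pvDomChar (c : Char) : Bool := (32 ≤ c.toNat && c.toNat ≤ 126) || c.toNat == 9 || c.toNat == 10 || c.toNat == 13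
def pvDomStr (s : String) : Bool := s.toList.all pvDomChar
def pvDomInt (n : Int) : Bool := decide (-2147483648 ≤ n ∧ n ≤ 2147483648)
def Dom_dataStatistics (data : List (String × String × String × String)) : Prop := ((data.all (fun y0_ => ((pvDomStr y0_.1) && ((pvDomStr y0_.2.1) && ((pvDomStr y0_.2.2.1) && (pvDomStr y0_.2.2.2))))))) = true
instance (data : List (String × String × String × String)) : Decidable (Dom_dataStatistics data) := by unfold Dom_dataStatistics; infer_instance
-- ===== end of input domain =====

-- B replaces A's one-pass conditional dict update with a flatten / group-by-keyword / reduce-each-group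
-- pipeline (alternative decomposition, same cost); equivalence of the returned dict (as items list) is proved.

-- ===== PORT A =====
def dataStatistics (data : List (String × String × String × String)) : List (String × String × Int) :=
  (data.foldl (fun database row =>
      -- split('; ') never returns an empty list, so `[0]` never raises: headD is exact here
      let a := ((PySem.Str.split? row.1 "; ").getD []).headD ""
      let b := (PySem.Str.split? row.2.1 "; ").getD []
      let c := (PySem.Str.split? row.2.2.1 "; ").getD []
      -- int(data[i][3]) raises ValueError on unparseable non-empty strings: excluded by Pre_
      let d : Int := if row.2.2.2 ≠ "" then (PySem.Int.ofStr? row.2.2.2).getD 2025 else 2025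
      let keywords := b ++ c
      if keywords ≠ [""] then
        keywords.foldl (fun database keyword =>
          if (database.getD (PySem.Str.lower keyword) (a, d)).2 ≥ d then
            database.insert (PySem.Str.lower keyword) (a, d)
          else database) database
      else database)
    (PySem.Dict.empty : PySem.Dict String (String × Int))).items

-- ===== PORT B =====
-- reduce one group: earliest year wins, ties go to the latest candidate
def dsBest (avs : List (String × Int)) : String × Int :=
  match avs with
  | [] => ("", 0)          -- unreachable in B: every group list is nonempty (avs[0] in Python)
  | best :: rest => rest.foldl (fun best av => if best.2 ≥ av.2 then av else best) best

def dataStatistics_alt (data : List (String × String × String × String)) : List (String × String × Int) :=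
  -- flatten: one (keyword, (author, year)) candidate per keyword occurrence
  let cands := data.foldl (fun cands row =>
      let author := ((PySem.Str.split? row.1 "; ").getD []).headD ""
      let year : Int := if row.2.2.2 = "" then 2025 else (PySem.Int.ofStr? row.2.2.2).getD 2025
      cands ++ ((PySem.Str.split? row.2.1 "; ").getD [] ++ (PySem.Str.split? row.2.2.1 "; ").getD []).map
          (fun kw => (PySem.Str.lower kw, (author, year)))) []
  -- group candidates by keyword (first-occurrence key order)
  let groups := cands.foldl (fun g p => g.modify p.1 [] (· ++ [p.2]))
      (PySem.Dict.empty : PySem.Dict String (List (String × Int)))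
  -- reduce each group
  (groups.items.foldl (fun r p => r.insert p.1 (dsBest p.2))
      (PySem.Dict.empty : PySem.Dict String (String × Int))).items

-- ===== PRECONDITION & SPEC =====
-- Pre_ excludes exactly the inputs where Python A raises ValueError: a record whose year field is
-- non-empty and not accepted by int().
def Pre_dataStatistics (data : List (String × String × String × String)) : Prop :=
  (data.all (fun row => row.2.2.2 == "" || (PySem.Int.ofStr? row.2.2.2).isSome)) = true
instance (data : List (String × String × String × String)) : Decidable (Pre_dataStatistics data) := by unfold Pre_dataStatistics; infer_instance

def pvWitness_dataStatistics : (List (String × String × String × String)) :=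
  [("Smith, J; Doe, A", "alpha; beta", "Gamma", "2001"), ("Li, K", "alpha", "", "1999")]

def Spec_dataStatistics (data : List (String × String × String × String)) (out : List (String × String × Int)) : Prop := out = dataStatistics_alt data
instance (data : List (String × String × String × String)) (out : List (String × String × Int)) : Decidable (Spec_dataStatistics data out) := by unfold Spec_dataStatistics; infer_instance

-- ===== CLAIM (what is proved, stated in full; the proofs are below) =====
def Claim_equal_dataStatistics : Prop := ∀ (data : List (String × String × String × String)), Dom_dataStatistics data → Pre_dataStatistics data → Spec_dataStatistics data (dataStatistics data)

-- ===== LEMMAS AND PROOFS =====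

-- the per-candidate step of A's loop
def dsStepA (db : PySem.Dict String (String × Int)) (p : String × (String × Int)) : PySem.Dict String (String × Int) :=
  if (db.getD p.1 p.2).2 ≥ p.2.2 then db.insert p.1 p.2 else db

-- the candidates one record contributes
def dsRow (row : String × String × String × String) : List (String × (String × Int)) :=
  let author := ((PySem.Str.split? row.1 "; ").getD []).headD ""
  let year : Int := if row.2.2.2 = "" then 2025 else (PySem.Int.ofStr? row.2.2.2).getD 2025
  ((PySem.Str.split? row.2.1 "; ").getD [] ++ (PySem.Str.split? row.2.2.1 "; ").getD []).map
    (fun kw => (PySem.Str.lower kw, (author, year)))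

-- A's running value for one key, as a fold over that key's candidate values
def dsG (o : Option (String × Int)) (vs : List (String × Int)) : Option (String × Int) :=
  vs.foldl (fun o v => some (match o with | none => v | some c => if c.2 ≥ v.2 then v else c)) o

theorem dsGo_ne_nil (sep : List Char) (fuel : Nat) (l cur : List Char) (acc : List (List Char)) :
    PySem.Chars.splitOn.go sep fuel l cur acc ≠ [] := by
  induction fuel generalizing l cur acc with
  | zero => simp [PySem.Chars.splitOn.go]
  | succ n ih =>
    cases l with
    | nil => simp [PySem.Chars.splitOn.go]
    | cons c rest =>
      rw [PySem.Chars.splitOn.go]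
      split
      · exact ih _ _ _
      · exact ih _ _ _

theorem dsSplit_ne_nil (s : String) : (PySem.Str.split? s "; ").getD [] ≠ [] := by
  have h : ("; ").toList = [';', ' '] := by decide
  simp [PySem.Str.split?, PySem.Chars.split?, h, PySem.Chars.splitOn]
  exact fun hh => dsGo_ne_nil _ _ _ _ _ (by simpa using congrArg (List.map String.ofList) hh)

-- A's row body is the fold of dsStepA over dsRow row
theorem dsRowA (db : PySem.Dict String (String × Int)) (row : String × String × String × String) :
    (let a := ((PySem.Str.split? row.1 "; ").getD []).headD ""
     let b := (PySem.Str.split? row.2.1 "; ").getD []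
     let c := (PySem.Str.split? row.2.2.1 "; ").getD []
     let d : Int := if row.2.2.2 ≠ "" then (PySem.Int.ofStr? row.2.2.2).getD 2025 else 2025
     let keywords := b ++ c
     if keywords ≠ [""] then
       keywords.foldl (fun database keyword =>
         if (database.getD (PySem.Str.lower keyword) (a, d)).2 ≥ d then
           database.insert (PySem.Str.lower keyword) (a, d)
         else database) db
     else db)
    = (dsRow row).foldl dsStepA db := by
  simp only []
  have hb := dsSplit_ne_nil row.2.1
  have hc := dsSplit_ne_nil row.2.2.1
  have hne : (PySem.Str.split? row.2.1 "; ").getD [] ++ (PySem.Str.split? row.2.2.1 "; ").getD [] ≠ [""] := by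
    intro h
    have h1 := List.length_pos_of_ne_nil hb
    have h2 := List.length_pos_of_ne_nil hc
    have := congrArg List.length h
    simp [List.length_append] at this
    omega
  rw [if_pos hne]
  simp only [dsRow, List.foldl_map, dsStepA]
  by_cases hy : row.2.2.2 = "" <;> simp [hy]

theorem dsFoldRows (data : List (String × String × String × String)) (db : PySem.Dict String (String × Int)) :
    data.foldl (fun db row => (dsRow row).foldl dsStepA db) db
      = (data.flatMap dsRow).foldl dsStepA db := by
  induction data generalizing db with
  | nil => rfl
  | cons r rs ih => simp [List.foldl_append, ih]

theorem dsA_eq (data : List (String × String × String × String)) :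
    dataStatistics data = ((data.flatMap dsRow).foldl dsStepA PySem.Dict.empty).items := by
  unfold dataStatistics
  rw [show (fun (database : PySem.Dict String (String × Int)) (row : String × String × String × String) =>
      let a := ((PySem.Str.split? row.1 "; ").getD []).headD ""
      let b := (PySem.Str.split? row.2.1 "; ").getD []
      let c := (PySem.Str.split? row.2.2.1 "; ").getD []
      let d : Int := if row.2.2.2 ≠ "" then (PySem.Int.ofStr? row.2.2.2).getD 2025 else 2025
      let keywords := b ++ c
      if keywords ≠ [""] then
        keywords.foldl (fun database keyword =>
          if (database.getD (PySem.Str.lower keyword) (a, d)).2 ≥ d then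
            database.insert (PySem.Str.lower keyword) (a, d)
          else database) database
      else database)
    = (fun db row => (dsRow row).foldl dsStepA db) from funext fun db => funext fun row => dsRowA db row]
  rw [dsFoldRows]

theorem dsG_some (vs : List (String × Int)) (c : String × Int) :
    dsG (some c) vs = some (vs.foldl (fun best av => if best.2 ≥ av.2 then av else best) c) := by
  induction vs generalizing c with
  | nil => rfl
  | cons v vs ih =>
    have h0 : dsG (some c) (v :: vs) = dsG (some (if c.2 ≥ v.2 then v else c)) vs := rfl
    rw [h0, ih, List.foldl_cons]

theorem dsG_none_cons (v : String × Int) (vs : List (String × Int)) :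
    dsG none (v :: vs) = some (dsBest (v :: vs)) := by
  simp [dsG, List.foldl_cons, dsBest]
  exact dsG_some vs v

theorem dsGet?_foldA (cs : List (String × (String × Int))) (db : PySem.Dict String (String × Int)) (k : String) :
    (cs.foldl dsStepA db).get? k
      = dsG (db.get? k) ((cs.filter (fun p => p.1 == k)).map (·.2)) := by
  induction cs generalizing db with
  | nil => rfl
  | cons p cs ih =>
    rw [List.foldl_cons, ih]
    by_cases hk : p.1 = k
    · subst hk
      have hstep : (dsStepA db p).get? p.1
          = some (match db.get? p.1 with | none => p.2 | some c => if c.2 ≥ p.2.2 then p.2 else c) := by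
        unfold dsStepA
        rw [PySem.Dict.getD_eq_get?_getD]
        cases h : db.get? p.1 with
        | none => simp [PySem.Dict.get?_insert_self]
        | some c =>
          by_cases hc : c.2 ≥ p.2.2
          · simp [hc, PySem.Dict.get?_insert_self]
          · simp [hc, h]
      rw [hstep]
      simp [dsG, List.foldl_cons]
    · have hstep : (dsStepA db p).get? k = db.get? k := by
        unfold dsStepA
        split
        · exact PySem.Dict.get?_insert_of_ne db _ (fun h => hk h.symm)
        · rfl
      rw [hstep]
      simp [hk]

theorem dsKeys_stepA (db : PySem.Dict String (String × Int)) (p : String × (String × Int)) :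
    (dsStepA db p).keys = PySem.Set.add db.keys p.1 := by
  unfold dsStepA
  by_cases hc : db.contains p.1
  · have hmem : p.1 ∈ db.keys := (PySem.Dict.contains_iff_mem_keys db p.1).mp hc
    rw [PySem.Set.add_of_mem hmem]
    split
    · exact PySem.Dict.keys_insert_of_contains db _ hc
    · rfl
  · have hnc : db.contains p.1 = false := by simpa using hc
    have hget : db.getD p.1 p.2 = p.2 := PySem.Dict.getD_of_not_contains db p.2 hnc
    rw [if_pos (by rw [hget]), PySem.Dict.keys_insert_of_not_contains db _ hnc,
        PySem.Set.add_of_not_mem (by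
          intro hmem
          exact absurd ((PySem.Dict.contains_iff_mem_keys db p.1).mpr hmem) (by simp [hnc]))]

theorem dsKeys_foldA (cs : List (String × (String × Int))) (db : PySem.Dict String (String × Int)) :
    (cs.foldl dsStepA db).keys = PySem.Set.update db.keys (cs.map (·.1)) := by
  induction cs generalizing db with
  | nil => rfl
  | cons p cs ih =>
    rw [List.foldl_cons, ih, List.map_cons, PySem.Set.update_cons, dsKeys_stepA]

theorem dsB_eq (data : List (String × String × String × String)) :
    dataStatistics_alt data
      = ((((data.flatMap dsRow).foldl (fun g p => g.modify p.1 [] (· ++ [p.2]))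
            (PySem.Dict.empty : PySem.Dict String (List (String × Int)))).items.foldl
          (fun r p => r.insert p.1 (dsBest p.2))
          (PySem.Dict.empty : PySem.Dict String (String × Int))).items) := by
  simp only [dataStatistics_alt]
  have hfn : (fun (cands : List (String × (String × Int))) row => cands ++
      ((PySem.Str.split? row.2.1 "; ").getD [] ++ (PySem.Str.split? row.2.2.1 "; ").getD []).map
        (fun kw => (PySem.Str.lower kw, (((PySem.Str.split? row.1 "; ").getD []).headD "",
          if row.2.2.2 = "" then 2025 else (PySem.Int.ofStr? row.2.2.2).getD 2025))))
      = (fun acc row => acc ++ dsRow row) := by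
    funext acc row; simp [dsRow]
  rw [hfn, (PySem.List.foldl_append_eq_flatMap dsRow data []).trans (List.nil_append _)]

theorem dataStatistics_spec : Claim_equal_dataStatistics := by
  intro data _ _
  show dataStatistics data = dataStatistics_alt data
  -- shared notation: all candidates, the distinct-key list, and each key's candidate values
  let cs := data.flatMap dsRow
  let ks : List String := PySem.Set.update ([] : PySem.Set String) (cs.map (·.1))
  let vsf : String → List (String × Int) := fun k => (cs.filter (fun p => p.1 == k)).map (·.2)
  -- A's dict, as a map over the distinct keys
  have hA : dataStatistics data = ks.map (fun k => (k, dsBest (vsf k))) := by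
    rw [dsA_eq]
    have hkeys : (cs.foldl dsStepA PySem.Dict.empty).keys = ks := by
      rw [dsKeys_foldA]; rfl
    have hnodup : (cs.foldl dsStepA PySem.Dict.empty).keys.Nodup := by
      rw [hkeys]; exact PySem.Set.nodup_update _ _ List.nodup_nil
    rw [PySem.Dict.items_eq_map_keys _ hnodup ("", 0), hkeys]
    apply List.map_congr_left
    intro k hk
    have hkmem : k ∈ cs.map (·.1) := by
      rcases (PySem.Set.mem_update ([] : PySem.Set String) (cs.map (·.1)) k).mp hk with h | h
      · exact absurd h (List.not_mem_nil)
      · exact h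
    have hvne : vsf k ≠ [] := by
      rcases List.mem_map.mp hkmem with ⟨p, hp, hpk⟩
      intro hnil
      have : p.2 ∈ vsf k := List.mem_map.mpr ⟨p, List.mem_filter.mpr ⟨hp, by simp [hpk]⟩, rfl⟩
      rw [hnil] at this
      exact absurd this (List.not_mem_nil)
    rw [PySem.Dict.getD_eq_get?_getD, dsGet?_foldA, PySem.Dict.get?_empty]
    cases hv : vsf k with
    | nil => exact absurd hv hvne
    | cons v rest =>
      have : (cs.filter (fun p => p.1 == k)).map (·.2) = v :: rest := hv
      rw [this, dsG_none_cons]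
      rfl
  -- B's dict, as the same map over the same keys
  have hB : dataStatistics_alt data = ks.map (fun k => (k, dsBest (vsf k))) := by
    rw [dsB_eq]
    have hgkeys : ((cs.foldl (fun g p => g.modify p.1 [] (· ++ [p.2]))
        (PySem.Dict.empty : PySem.Dict String (List (String × Int)))).keys) = ks := by
      rw [PySem.Dict.keys_foldl_modify_key cs (·.1) [] (fun _ p => (· ++ [p.2]))]; rfl
    have hgnodup : ((cs.foldl (fun g p => g.modify p.1 [] (· ++ [p.2]))
        (PySem.Dict.empty : PySem.Dict String (List (String × Int)))).keys).Nodup := by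
      rw [hgkeys]; exact PySem.Set.nodup_update _ _ List.nodup_nil
    have hitems : ((cs.foldl (fun g p => g.modify p.1 [] (· ++ [p.2]))
        (PySem.Dict.empty : PySem.Dict String (List (String × Int)))).items)
        = ks.map (fun k => (k, vsf k)) := by
      rw [PySem.Dict.items_eq_map_keys _ hgnodup [], hgkeys]
      apply List.map_congr_left
      intro k _
      rw [PySem.Dict.getD_foldl_modify_append cs _ k, PySem.Dict.getD_empty, List.nil_append]
    have hfresh := PySem.Dict.items_foldl_insert_fresh (ks.map (fun k => (k, vsf k)))
        (fun p => p.1) (fun p => dsBest p.2)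
        (PySem.Dict.empty : PySem.Dict String (String × Int))
        (fun a _ => PySem.Dict.contains_empty _)
        (by simpa [Function.comp_def] using PySem.Set.nodup_update ([] : PySem.Set String) (cs.map (·.1)) List.nodup_nil)
    rw [hitems, hfresh]
    simp [Function.comp_def, PySem.Dict.empty]
  rw [hA, hB]
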